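-- pv_equiv track=rewrite | github.com/ai4curation/ai-gene-review | genes/RAMVA/RvY_13070/RvY_13070-bioinformatics/analyze_sods.py | map_residues
-- ===== SOURCE A (Python) =====
-- def map_residues(ref_aligned: str, query_aligned: str, ref_positions: list[int]) -> dict[int, tuple[int | None, str]]:
--     """Map reference residue positions to the query sequence.
--
--     Returns dict of ref_pos -> (query_pos, query_residue). query_pos is None if gapped.
--     """
--     # Walk through alignment; track positions in reference and query
--     ref_pos = 0
--     query_pos = 0
--     ref_to_query = {}
--     for r, q in zip(ref_aligned, query_aligned):
--         if r != "-":
--             ref_pos += 1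
--         if q != "-":
--             query_pos += 1
--         if r != "-" and ref_pos in ref_positions:
--             if q == "-":
--                 ref_to_query[ref_pos] = (None, "-")
--             else:
--                 ref_to_query[ref_pos] = (query_pos, q)
--     return ref_to_query
-- ===== SOURCE B (Python) =====
-- def map_residues(ref_aligned: str, query_aligned: str, ref_positions: list[int]) -> dict:
--     """Index-and-lookup: precompute the alignment column of every reference residue
--     and prefix counts of query residues, then answer each requested position (sorted,
--     deduplicated) by direct random-access lookup."""
--     cols = list(zip(ref_aligned, query_aligned))
--     # column index of the k-th reference residue (k starting at 0)
--     ref_cols = [i for i, (r, _) in enumerate(cols) if r != "-"]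
--     # qcount[i] = number of query residues in columns 0..i
--     qcount = []
--     c = 0
--     for _, q in cols:
--         if q != "-":
--             c += 1
--         qcount.append(c)
--     out = {}
--     for p in sorted(set(ref_positions)):
--         if 1 <= p <= len(ref_cols):
--             i = ref_cols[p - 1]
--             q = cols[i][1]
--             out[p] = (None, "-") if q == "-" else (qcount[i], q)
--     return out
-- ===== Notes on version B (the rewrite author's own statement) =====
-- stated objective: faster
-- what changed: A is a stateful scan with two running counters that filters inline, testing list membership at every reference residue; B precomputes positional indexes (column index of each reference residue, prefix counts of query residues) and then answers each requested position from sorted(set(ref_positions)) by direct random-access lookup, with no per-column membership test.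
import Mathlib
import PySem

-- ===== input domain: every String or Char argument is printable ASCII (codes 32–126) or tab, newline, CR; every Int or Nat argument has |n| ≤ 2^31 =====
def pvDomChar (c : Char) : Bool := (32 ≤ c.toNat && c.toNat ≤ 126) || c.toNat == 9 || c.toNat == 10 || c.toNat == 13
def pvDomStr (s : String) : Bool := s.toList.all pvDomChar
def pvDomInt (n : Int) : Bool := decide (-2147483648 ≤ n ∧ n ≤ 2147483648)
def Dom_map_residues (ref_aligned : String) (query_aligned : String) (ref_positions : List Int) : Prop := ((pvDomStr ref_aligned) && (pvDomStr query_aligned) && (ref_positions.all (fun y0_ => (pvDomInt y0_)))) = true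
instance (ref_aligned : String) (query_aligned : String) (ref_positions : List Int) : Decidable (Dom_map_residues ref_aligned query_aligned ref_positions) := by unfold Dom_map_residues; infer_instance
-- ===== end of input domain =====

-- B replaces A's stateful scan-and-filter with precomputed positional indexes
-- (ref-residue column list + query prefix counts) consulted per sorted requested
-- position (faster: no per-column membership scan of the positions list).


-- ===== PORT A =====
-- A's loop over zip(ref_aligned, query_aligned) with state (ref_pos, query_pos, dict)
def mapLoopA (pairs : List (Char × Char)) (ref_pos query_pos : Int)
    (d : PySem.Dict Int (Option Int × String)) (ref_positions : List Int) :
    PySem.Dict Int (Option Int × String) :=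
  match pairs with
  | [] => d
  | (r, q) :: rest =>
    let ref_pos' := if r ≠ '-' then ref_pos + 1 else ref_pos
    let query_pos' := if q ≠ '-' then query_pos + 1 else query_pos
    let d' := if r ≠ '-' ∧ ref_pos' ∈ ref_positions then
        (if q = '-' then d.insert ref_pos' (none, "-")
         else d.insert ref_pos' (some query_pos', String.mk [q]))
      else d
    mapLoopA rest ref_pos' query_pos' d' ref_positions

def map_residues (ref_aligned : String) (query_aligned : String) (ref_positions : List Int) : List (Int × Option Int × String) :=
  (mapLoopA (ref_aligned.toList.zip query_aligned.toList) 0 0 PySem.Dict.empty ref_positions).items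

-- ===== PORT B =====
-- qcount of Source B: prefix counts of query residues, one entry per alignment column
def qPrefix : List (Char × Char) → Int → List Int
  | [], _ => []
  | (_, q) :: rest, c =>
    let c' := if q ≠ '-' then c + 1 else c
    c' :: qPrefix rest c'

-- Source B: build ref_cols and qcount in one form each, then look up each requested
-- position from sorted(set(ref_positions)) by direct indexing
def map_residues_alt (ref_aligned : String) (query_aligned : String) (ref_positions : List Int) : List (Int × Option Int × String) :=
  let cols := ref_aligned.toList.zip query_aligned.toList
  let refCols := (PySem.List.enumerate cols).filterMap
    (fun e => if e.2.1 ≠ '-' then some e.1 else none)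
  let qcount := qPrefix cols 0
  (PySem.List.sorted (PySem.Set.ofList ref_positions) (fun x => x) false).filterMap
    (fun p =>
      if 1 ≤ p ∧ p ≤ (refCols.length : Int) then
        let i := PySem.List.pyGetD refCols (p - 1) 0
        let q := (PySem.List.pyGetD cols i ('-', '-')).2
        some (p, if q = '-' then ((none : Option Int), "-")
                 else (some (PySem.List.pyGetD qcount i 0), String.mk [q]))
      else none)

-- ===== PRECONDITION & SPEC =====
def Spec_map_residues (ref_aligned : String) (query_aligned : String) (ref_positions : List Int) (out : List (Int × Option Int × String)) : Prop := out = map_residues_alt ref_aligned query_aligned ref_positions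
instance (ref_aligned : String) (query_aligned : String) (ref_positions : List Int) (out : List (Int × Option Int × String)) : Decidable (Spec_map_residues ref_aligned query_aligned ref_positions out) := by unfold Spec_map_residues; infer_instance

-- ===== CLAIM (what is proved, stated in full; the proofs are below) =====
def Claim_equal_map_residues : Prop := ∀ (ref_aligned : String) (query_aligned : String) (ref_positions : List Int), Dom_map_residues ref_aligned query_aligned ref_positions → Spec_map_residues ref_aligned query_aligned ref_positions (map_residues ref_aligned query_aligned ref_positions)

-- ===== LEMMAS AND PROOFS =====

-- proof-side skeleton of A's dict: the full table (ref_num, value) of reference residues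
def tableOf (pairs : List (Char × Char)) (ref_num query_num : Int) :
    List (Int × Option Int × String) :=
  match pairs with
  | [] => []
  | (r, q) :: rest =>
    let query_num' := if q ≠ '-' then query_num + 1 else query_num
    if r ≠ '-' then
      (ref_num + 1, if q = '-' then ((none : Option Int), "-") else (some query_num', String.mk [q]))
        :: tableOf rest (ref_num + 1) query_num'
    else tableOf rest ref_num query_num'

-- proof-side Nat version of Source B's ref_cols
def refColsN : List (Char × Char) → List Nat
  | [] => []
  | (r, _) :: rest =>
    if r ≠ '-' then 0 :: (refColsN rest).map (· + 1) else (refColsN rest).map (· + 1)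

-- the value B computes for the reference residue at column i
def valAt (cols : List (Char × Char)) (qp : Int) (i : Nat) : Option Int × String :=
  let q := (cols.getD i ('-', '-')).2
  if q = '-' then ((none : Option Int), "-")
  else (some ((qPrefix cols qp).getD i 0), String.mk [q])

-- every key produced by tableOf from counter rp exceeds rp, so A's inserts are fresh appends
theorem mapLoopA_items (pairs : List (Char × Char)) (ps : List Int) :
    ∀ (rp qp : Int) (d : PySem.Dict Int (Option Int × String)),
    (∀ k ∈ d.keys, k ≤ rp) →
    (mapLoopA pairs rp qp d ps).items
      = d.items ++ (tableOf pairs rp qp).filter (fun e => decide (e.1 ∈ ps)) := by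
  induction pairs with
  | nil => intro rp qp d _; simp [mapLoopA, tableOf]
  | cons hd rest ih =>
    intro rp qp d hinv
    obtain ⟨r, q⟩ := hd
    by_cases hr : r = '-'
    · simp only [mapLoopA, tableOf, hr, ne_eq, not_true_eq_false, if_neg,
        false_and, not_false_eq_true]
      exact ih rp _ d hinv
    · have hfresh : d.contains (rp + 1) = false := by
        cases hc : d.contains (rp + 1) with
        | false => rfl
        | true =>
          have hk := (PySem.Dict.contains_iff_mem_keys _ _).1 hc
          have := hinv _ hk
          omega
      have hinv' : ∀ v, ∀ k ∈ (d.insert (rp + 1) v).keys, k ≤ rp + 1 := by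
        intro v k hk
        rcases (PySem.Dict.mem_keys_insert _ _ _ _).1 hk with h | h
        · omega
        · have := hinv _ h; omega
      by_cases hmem : (rp + 1) ∈ ps
      · by_cases hq : q = '-'
        · simp only [mapLoopA, tableOf, hr, hq, ne_eq, not_false_eq_true, if_true,
            not_true_eq_false, ite_false, true_and, if_pos hmem]
          rw [ih (rp + 1) qp _ (hinv' _),
            PySem.Dict.items_insert_of_not_contains _ _ hfresh]
          simp [List.filter, hmem]
        · simp only [mapLoopA, tableOf, hr, hq, ne_eq, not_false_eq_true, if_true,
            true_and, if_pos hmem, ite_false]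
          rw [ih (rp + 1) _ _ (hinv' _),
            PySem.Dict.items_insert_of_not_contains _ _ hfresh]
          simp [List.filter, hmem]
      · by_cases hq : q = '-' <;>
        · simp only [mapLoopA, tableOf, hr, hq, ne_eq, not_false_eq_true, if_true,
            not_true_eq_false, ite_false, true_and, if_neg hmem]
          rw [ih (rp + 1) _ d (fun k hk => by have := hinv _ hk; omega)]
          simp [List.filter, hmem]

theorem refCols_eq (cols : List (Char × Char)) : ∀ s : Int,
    (PySem.List.enumerate cols s).filterMap
      (fun e => if e.2.1 ≠ '-' then some e.1 else none)
    = (refColsN cols).map (fun k => s + Int.ofNat k) := by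
  induction cols with
  | nil => intro s; simp [PySem.List.enumerate_nil, refColsN]
  | cons hd rest ih =>
    intro s
    obtain ⟨r, q⟩ := hd
    rw [PySem.List.enumerate_cons, List.filterMap_cons]
    by_cases hr : r = '-'
    · simp only [refColsN, hr, ne_eq, not_true_eq_false, if_neg, not_false_eq_true]
      rw [ih (s + 1), List.map_map]
      apply List.map_congr_left
      intro k _
      simp [Int.ofNat_eq_natCast]; ring
    · simp only [refColsN, hr, ne_eq, not_false_eq_true, if_true]
      rw [ih (s + 1)]
      simp only [List.map_cons, List.map_map, Int.ofNat_eq_natCast, Nat.cast_zero, add_zero]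
      congr 1
      apply List.map_congr_left
      intro k _
      simp [Function.comp]; ring

theorem valAt_succ (r q : Char) (rest : List (Char × Char)) (qp : Int) (i : Nat) :
    valAt ((r, q) :: rest) qp (i + 1)
      = valAt rest (if q ≠ '-' then qp + 1 else qp) i := by
  simp [valAt, qPrefix]

theorem valAt_zero (r q : Char) (rest : List (Char × Char)) (qp : Int) :
    valAt ((r, q) :: rest) qp 0
      = if q = '-' then ((none : Option Int), "-")
        else (some (if q ≠ '-' then qp + 1 else qp), String.mk [q]) := by
  by_cases hq : q = '-' <;> simp [valAt, qPrefix, hq]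

theorem tableOf_length (cols : List (Char × Char)) : ∀ rp qp,
    (tableOf cols rp qp).length = (refColsN cols).length := by
  induction cols with
  | nil => intro rp qp; simp [tableOf, refColsN]
  | cons hd rest ih =>
    intro rp qp
    obtain ⟨r, q⟩ := hd
    by_cases hr : r = '-' <;> simp [tableOf, refColsN, hr, ih]

theorem tableOf_getElem? (cols : List (Char × Char)) : ∀ (rp qp : Int) (k : Nat),
    (tableOf cols rp qp)[k]? = ((refColsN cols)[k]?).map
      (fun i => (rp + (k : Int) + 1, valAt cols qp i)) := by
  induction cols with
  | nil => intro rp qp k; simp [tableOf, refColsN]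
  | cons hd rest ih =>
    intro rp qp k
    obtain ⟨r, q⟩ := hd
    by_cases hr : r = '-'
    · simp only [tableOf, refColsN, hr, ne_eq, not_true_eq_false, if_neg, not_false_eq_true]
      rw [ih]
      simp only [List.getElem?_map, Option.map_map]
      cases h : (refColsN rest)[k]? with
      | none => simp
      | some i => simp [valAt_succ, Function.comp]
    · simp only [tableOf, refColsN, hr, ne_eq, not_false_eq_true, if_true]
      cases k with
      | zero =>
        simp [valAt_zero]
      | succ k =>
        simp only [List.getElem?_cons_succ]
        rw [ih]
        simp only [List.getElem?_map, Option.map_map]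
        cases h : (refColsN rest)[k]? with
        | none => simp
        | some i =>
          simp only [Option.map_some, Function.comp]
          rw [valAt_succ]
          congr 1
          push_cast; ring_nf

theorem filter_eq_range_filterMap {α : Type} (t : List α) (P : α → Bool) (d : α) :
    t.filter P = (List.range t.length).filterMap
      (fun k => if P (t.getD k d) then some (t.getD k d) else none) := by
  induction t with
  | nil => simp
  | cons a t ih =>
    rw [List.length_cons, List.range_succ_eq_map, List.filterMap_cons, List.filterMap_map]
    simp only [List.getD_cons_zero, List.getD_cons_succ, Function.comp_def]
    rw [List.filter_cons]
    cases h : P a <;> simp [h, ih]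

theorem filterMap_guard {α β : Type} (l : List α) (c : α → Prop) [DecidablePred c] (f : α → β) :
    l.filterMap (fun x => if c x then some (f x) else none)
      = (l.filter (fun x => decide (c x))).map f := by
  induction l with
  | nil => simp
  | cons a l ih =>
    rw [List.filterMap_cons, List.filter_cons]
    by_cases h : c a <;> simp [h, ih]

theorem core (ra qa : String) (ps : List Int) :
    (tableOf (ra.toList.zip qa.toList) 0 0).filter (fun e => decide (e.1 ∈ ps))
      = map_residues_alt ra qa ps := by
  unfold map_residues_alt
  set cols := ra.toList.zip qa.toList with hcols
  have hrc : (PySem.List.enumerate cols 0).filterMap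
      (fun e => if e.2.1 ≠ '-' then some e.1 else none)
      = (refColsN cols).map (fun k => Int.ofNat k) := by
    rw [refCols_eq]
    exact List.map_congr_left (fun k _ => by simp)
  simp only [hrc, List.length_map]
  rw [filter_eq_range_filterMap _ _ ((0 : Int), (none : Option Int), "")]
  rw [tableOf_length cols 0 0]
  have hcongr : ∀ k ∈ List.range (refColsN cols).length,
      (if decide ((((tableOf cols 0 0).getD k ((0 : Int), (none : Option Int), "")).1) ∈ ps)
       then some ((tableOf cols 0 0).getD k ((0 : Int), (none : Option Int), "")) else none)
      = (if ((k : Int) + 1) ∈ ps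
         then some (((k : Int) + 1, valAt cols 0 ((refColsN cols).getD k 0)) : Int × Option Int × String) else none) := by
    intro k hk
    have hk' : k < (refColsN cols).length := List.mem_range.mp hk
    have hg : (tableOf cols 0 0).getD k ((0 : Int), (none : Option Int), "")
        = ((k : Int) + 1, valAt cols 0 ((refColsN cols).getD k 0)) := by
      rw [List.getD_eq_getElem?_getD, tableOf_getElem?]
      rw [List.getElem?_eq_getElem hk']
      simp only [Option.map_some, Option.getD_some, zero_add]
      rw [List.getD_eq_getElem _ _ hk']
    rw [hg]
    simp
  rw [List.filterMap_congr hcongr]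
  rw [filterMap_guard (c := fun k : Nat => ((k : Int) + 1) ∈ ps)
    (f := fun k : Nat => (((k : Int) + 1, valAt cols 0 ((refColsN cols).getD k 0)) : Int × Option Int × String))]
  rw [filterMap_guard (c := fun p : Int => 1 ≤ p ∧ p ≤ ((refColsN cols).length : Int))
    (f := fun p : Int =>
      (p, if (PySem.List.pyGetD cols (PySem.List.pyGetD ((refColsN cols).map (fun k => Int.ofNat k)) (p - 1) 0) ('-', '-')).2 = '-'
          then ((none : Option Int), "-")
          else (some (PySem.List.pyGetD (qPrefix cols 0)
                  (PySem.List.pyGetD ((refColsN cols).map (fun k => Int.ofNat k)) (p - 1) 0) 0),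
                String.mk [(PySem.List.pyGetD cols (PySem.List.pyGetD ((refColsN cols).map (fun k => Int.ofNat k)) (p - 1) 0) ('-', '-')).2])))]
  have hFk : ∀ k : Nat, k ∈ (List.range (refColsN cols).length).filter
      (fun k : Nat => decide (((k : Int) + 1) ∈ ps)) →
      (((k : Int) + 1, valAt cols 0 ((refColsN cols).getD k 0)) : Int × Option Int × String)
      = (fun p : Int =>
          (p, if (PySem.List.pyGetD cols (PySem.List.pyGetD ((refColsN cols).map (fun k => Int.ofNat k)) (p - 1) 0) ('-', '-')).2 = '-'
              then ((none : Option Int), "-")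
              else (some (PySem.List.pyGetD (qPrefix cols 0)
                      (PySem.List.pyGetD ((refColsN cols).map (fun k => Int.ofNat k)) (p - 1) 0) 0),
                    String.mk [(PySem.List.pyGetD cols (PySem.List.pyGetD ((refColsN cols).map (fun k => Int.ofNat k)) (p - 1) 0) ('-', '-')).2])))
        ((k : Int) + 1) := by
    intro k hk
    have hk' : k < (refColsN cols).length := List.mem_range.mp (List.mem_of_mem_filter hk)
    have h1 : ((k : Int) + 1 - 1) = (k : Int) := by ring
    simp only [h1, Int.ofNat_eq_natCast, PySem.List.pyGetD_natCast, valAt,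
      List.getD_eq_getElem?_getD, List.getElem?_map, List.getElem?_eq_getElem hk']
    simp [PySem.List.pyGetD_natCast]
  have hmemL : ∀ p : Int, p ∈ ((List.range (refColsN cols).length).filter
      (fun k : Nat => decide (((k : Int) + 1) ∈ ps))).map (fun k : Nat => (k : Int) + 1)
      ↔ (p ∈ ps ∧ 1 ≤ p ∧ p ≤ ((refColsN cols).length : Int)) := by
    intro p
    simp only [List.mem_map, List.mem_filter, List.mem_range, decide_eq_true_eq]
    constructor
    · rintro ⟨k, ⟨hk, hmem⟩, rfl⟩
      exact ⟨hmem, by omega, by omega⟩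
    · rintro ⟨hp, h1, h2⟩
      refine ⟨(p - 1).toNat, ⟨by omega, ?_⟩, by omega⟩
      have h3 : (((p - 1).toNat : Int) + 1) = p := by omega
      rw [h3]; exact hp
  have hmemR : ∀ p : Int, p ∈ (PySem.List.sorted (PySem.Set.ofList ps) (fun x => x) false).filter
      (fun p => decide (1 ≤ p ∧ p ≤ ((refColsN cols).length : Int)))
      ↔ (p ∈ ps ∧ 1 ≤ p ∧ p ≤ ((refColsN cols).length : Int)) := by
    intro p
    simp [List.mem_filter, PySem.List.mem_sorted, PySem.Set.mem_ofList]
  have hltL : (((List.range (refColsN cols).length).filter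
      (fun k : Nat => decide (((k : Int) + 1) ∈ ps))).map (fun k : Nat => (k : Int) + 1)).Pairwise (· < ·) := by
    refine List.Pairwise.map _ (fun a b h => ?_) (List.Pairwise.filter _ List.pairwise_lt_range)
    omega
  have hltR : ((PySem.List.sorted (PySem.Set.ofList ps) (fun x => x) false).filter
      (fun p => decide (1 ≤ p ∧ p ≤ ((refColsN cols).length : Int)))).Pairwise (· < ·) :=
    List.Pairwise.filter _ (PySem.List.sorted_ofList_pairwise_lt ps)
  have hndL := hltL.imp (fun h => ne_of_lt h)
  have hndR := hltR.imp (fun h => ne_of_lt h)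
  have hperm := (List.perm_ext_iff_of_nodup hndR hndL).2
    (fun p => (hmemR p).trans ((hmemL p).symm))
  have he1 := PySem.List.sorted_eq_of_perm_of_pairwise_lt _ _ (fun x => x) hperm hltR
  have he2 := PySem.List.sorted_eq_of_perm_of_pairwise_lt _ _ (fun x => x)
    (List.Perm.refl (((List.range (refColsN cols).length).filter
      (fun k : Nat => decide (((k : Int) + 1) ∈ ps))).map (fun k : Nat => (k : Int) + 1))) hltL
  have heq := he2.symm.trans he1
  rw [← heq, List.map_map]
  exact List.map_congr_left (fun k hk => by simpa [Function.comp] using hFk k hk)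

-- ===== VERDICT (by name: the statement is the Claim_ definition above) =====
theorem map_residues_spec : Claim_equal_map_residues := by
  intro ra qa ps _
  unfold Spec_map_residues map_residues
  rw [mapLoopA_items _ _ 0 0 PySem.Dict.empty (by simp [PySem.Dict.keys_empty])]
  rw [← core ra qa ps]
  rfl
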